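-- pv_equiv track=rewrite | github.com/google-deepmind/simply | simply/tool_lib.py | get_answer_mask
-- ===== SOURCE A (Python) =====
-- def _find_sublist_index(
--     main_list: list[int], sub_list: list[int], start_index: int = 0
-- ) -> int:
--   """Finds the starting index of the first sub_list after start_index."""
--   n = len(main_list)
--   m = len(sub_list)
--   if m == 0:
--     return start_index
--   if start_index < 0:
--     start_index = 0
--   if m > n - start_index:
--     return -1
--   for i in range(start_index, n - m + 1):
--     if main_list[i : i + m] == sub_list:
--       return i
--   return -1
--
-- def get_answer_mask(
--     tokens: list[int],
--     start_tokens: list[int],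
--     end_tokens: list[int],
-- ) -> list[bool]:
--   """Generates a token mask for multiple non-overlapping turns."""
--   num_tokens = len(tokens)
--   mask = [False] * num_tokens
--
--   if not start_tokens or not end_tokens:
--     return mask
--
--   current_idx = 0
--   while current_idx < num_tokens:
--     s_idx = _find_sublist_index(tokens, start_tokens, current_idx)
--     if s_idx == -1:
--       break  # No more start tags
--     mask_start_idx = s_idx + len(start_tokens)
--     if mask_start_idx > num_tokens:
--       break  # Should not happen if s_idx is valid
--     e_idx = _find_sublist_index(tokens, end_tokens, mask_start_idx)
--     if e_idx == -1:
--       break  # No matching end tag for the last found start tag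
--     mask_end_idx = e_idx + len(end_tokens)
--     for i in range(mask_start_idx, mask_end_idx):
--       if 0 <= i < num_tokens:
--         mask[i] = True
--     current_idx = mask_end_idx
--
--   return mask
-- ===== SOURCE B (Python) =====
-- def get_answer_mask(tokens, start_tokens, end_tokens):
--   """Occurrence lists + a two-pointer pairing pass, mask built as concatenated runs."""
--   n = len(tokens)
--   if not start_tokens or not end_tokens:
--     return [False] * n
--   m1 = len(start_tokens)
--   m2 = len(end_tokens)
--   starts = [i for i in range(n - m1 + 1) if tokens[i:i + m1] == start_tokens]
--   ends = [i for i in range(n - m2 + 1) if tokens[i:i + m2] == end_tokens]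
--   mask = []
--   pos = 0
--   si = ei = 0
--   while True:
--     while si < len(starts) and starts[si] < pos:
--       si += 1
--     if si == len(starts):
--       break
--     lo = starts[si] + m1
--     si += 1
--     while ei < len(ends) and ends[ei] < lo:
--       ei += 1
--     if ei == len(ends):
--       break
--     hi = ends[ei] + m2
--     mask.extend([False] * (lo - pos))
--     mask.extend([True] * (hi - lo))
--     pos = hi
--   mask.extend([False] * (n - pos))
--   return mask
-- ===== Notes on version B (the rewrite author's own statement) =====
-- stated objective: alternative
-- what changed: B precomputes the start/end occurrence index lists once, pairs them in a single two-pointer merge pass, and builds the mask by concatenating false/true runs, instead of A's repeated naive sublist search from each position with in-place point updates.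
import Mathlib
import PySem

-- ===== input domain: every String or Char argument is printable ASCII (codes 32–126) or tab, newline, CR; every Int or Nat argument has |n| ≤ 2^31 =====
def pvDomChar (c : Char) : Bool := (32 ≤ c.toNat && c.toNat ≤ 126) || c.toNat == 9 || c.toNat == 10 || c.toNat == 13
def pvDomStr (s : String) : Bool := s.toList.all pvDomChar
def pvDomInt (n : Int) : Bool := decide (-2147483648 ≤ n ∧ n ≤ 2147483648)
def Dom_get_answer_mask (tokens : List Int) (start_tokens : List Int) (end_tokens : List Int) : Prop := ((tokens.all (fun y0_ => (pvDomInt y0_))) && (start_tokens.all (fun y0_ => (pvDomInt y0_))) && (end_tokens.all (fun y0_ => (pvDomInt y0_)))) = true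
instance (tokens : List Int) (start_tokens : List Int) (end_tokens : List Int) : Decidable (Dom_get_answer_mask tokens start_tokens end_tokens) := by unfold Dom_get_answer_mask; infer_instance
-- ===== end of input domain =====

-- B precomputes all delimiter occurrences once and pairs them in a single two-pointer pass,
-- building the mask as concatenated runs, instead of A's repeated naive search with in-place
-- point updates (objective: alternative).

-- ===== PORT A =====
-- the for-loop of _find_sublist_index
def pvFindLoop (main sub : List Int) (i stop : Nat) : Int :=
  if i < stop then
    if PySem.List.slice main (some (i : Int)) (some ((i : Int) + (sub.length : Int))) = sub then (i : Int)
    else pvFindLoop main sub (i + 1) stop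
  else -1
termination_by stop - i

def pvFindSublistIndex (main sub : List Int) (start : Int) : Int :=
  let n : Int := main.length
  let m : Int := sub.length
  if m = 0 then start
  else
    let start := if start < 0 then 0 else start
    if m > n - start then -1
    else pvFindLoop main sub start.toNat (n - m + 1).toNat

-- the inner "for i in range(mask_start_idx, mask_end_idx)" loop
def pvSetLoop (mask : List Bool) (i stop n : Nat) : List Bool :=
  if i < stop then pvSetLoop (if i < n then mask.set i true else mask) (i + 1) stop n
  else mask
termination_by stop - i

-- the while loop; fuel bounds the iteration count (current_idx strictly grows each turn)
def pvALoop (tokens start_tokens end_tokens : List Int) (n : Nat) (fuel : Nat) (current : Int) (mask : List Bool) : List Bool :=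
  match fuel with
  | 0 => mask
  | fuel + 1 =>
    if current < (n : Int) then
      let s := pvFindSublistIndex tokens start_tokens current
      if s = -1 then mask
      else
        let lo := s + (start_tokens.length : Int)
        if lo > (n : Int) then mask
        else
          let e := pvFindSublistIndex tokens end_tokens lo
          if e = -1 then mask
          else
            let hi := e + (end_tokens.length : Int)
            pvALoop tokens start_tokens end_tokens n fuel hi (pvSetLoop mask lo.toNat hi.toNat n)
    else mask

def get_answer_mask (tokens : List Int) (start_tokens : List Int) (end_tokens : List Int) : List Bool :=
  let n := tokens.length
  let mask := List.replicate n false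
  if start_tokens = [] ∨ end_tokens = [] then mask
  else pvALoop tokens start_tokens end_tokens n (n + 1) 0 mask

-- ===== PORT B =====
-- all indices at which sub occurs in tokens (the two comprehensions of Source B)
def pvOcc (tokens sub : List Int) : List Int :=
  (PySem.List.pyRange 0 ((tokens.length : Int) - (sub.length : Int) + 1) 1).filter
    (fun i => decide (PySem.List.slice tokens (some i) (some (i + (sub.length : Int))) = sub))

-- the two-pointer pairing loop of Source B (a pointer into a list is ported as its suffix)
def pvPair (starts ends : List Int) (m1 m2 pos : Int) : List (Int × Int) :=
  match hS : starts.dropWhile (fun s => decide (s < pos)) with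
  | [] => []
  | s :: srest =>
    match ends.dropWhile (fun e => decide (e < s + m1)) with
    | [] => []
    | e :: erest => (s + m1, e + m2) :: pvPair srest (e :: erest) m1 m2 (e + m2)
termination_by starts.length
decreasing_by
  have h := List.length_dropWhile_le (p := fun s => decide (s < pos)) (l := starts)
  rw [hS] at h
  simpa using Nat.lt_of_lt_of_le (Nat.lt_succ_self _) (by simpa using h)

-- the final mask-building loop of Source B
def pvBuild (intervals : List (Int × Int)) (pos n : Int) : List Bool :=
  match intervals with
  | [] => List.replicate (n - pos).toNat false
  | (lo, hi) :: rest =>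
    List.replicate (lo - pos).toNat false ++ List.replicate (hi - lo).toNat true ++ pvBuild rest hi n

def get_answer_mask_alt (tokens : List Int) (start_tokens : List Int) (end_tokens : List Int) : List Bool :=
  let n := tokens.length
  if start_tokens = [] ∨ end_tokens = [] then List.replicate n false
  else
    pvBuild (pvPair (pvOcc tokens start_tokens) (pvOcc tokens end_tokens)
      (start_tokens.length : Int) (end_tokens.length : Int) 0) 0 (n : Int)

-- ===== PRECONDITION & SPEC =====
def Spec_get_answer_mask (tokens : List Int) (start_tokens : List Int) (end_tokens : List Int) (out : List Bool) : Prop := out = get_answer_mask_alt tokens start_tokens end_tokens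
instance (tokens : List Int) (start_tokens : List Int) (end_tokens : List Int) (out : List Bool) : Decidable (Spec_get_answer_mask tokens start_tokens end_tokens out) := by unfold Spec_get_answer_mask; infer_instance

-- ===== CLAIM (what is proved, stated in full; the proofs are below) =====
def Claim_equal_get_answer_mask : Prop := ∀ (tokens : List Int) (start_tokens : List Int) (end_tokens : List Int), Dom_get_answer_mask tokens start_tokens end_tokens → Spec_get_answer_mask tokens start_tokens end_tokens (get_answer_mask tokens start_tokens end_tokens)

-- ===== LEMMAS AND PROOFS =====

-- the slice-equality test both programs make at index i
def pvP (main sub : List Int) (i : Int) : Bool :=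
  decide (PySem.List.slice main (some i) (some (i + (sub.length : Int))) = sub)

lemma pvOcc_eq (tokens sub : List Int) :
    pvOcc tokens sub =
      ((List.range ((tokens.length : Int) - (sub.length : Int) + 1).toNat).filter
        (fun (j : Nat) => pvP tokens sub (j : Int))).map (fun (j : Nat) => (j : Int)) := by
  unfold pvOcc pvP
  rw [PySem.List.pyRange_one]
  simp only [zero_add, sub_zero]
  rw [List.filter_map]
  rfl

lemma pvOcc_bounds (tokens sub : List Int) {x : Int} (hx : x ∈ pvOcc tokens sub) :
    0 ≤ x ∧ x + (sub.length : Int) ≤ (tokens.length : Int) := by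
  unfold pvOcc at hx
  rw [List.mem_filter] at hx
  have := (PySem.List.mem_pyRange_one).mp hx.1
  omega

-- generic dropWhile facts
lemma dropWhile_head_false {α : Type} (p : α → Bool) {l : List α} {x : α} {xs : List α}
    (h : l.dropWhile p = x :: xs) : p x = false := by
  induction l with
  | nil => simp at h
  | cons a t ih =>
    rw [List.dropWhile_cons] at h
    split at h
    · exact ih h
    · rename_i hp
      obtain ⟨rfl, -⟩ := List.cons.injEq .. ▸ h
      simpa using hp

lemma dropWhile_lt_head_of_mem {l : List Nat} {i : Nat}
    (hs : l.Pairwise (· < ·)) (hi : i ∈ l) :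
    (l.dropWhile (fun j => decide (j < i))).head? = some i := by
  induction l with
  | nil => simp at hi
  | cons a t ih =>
    rw [List.dropWhile_cons]
    rcases List.pairwise_cons.mp hs with ⟨ha, ht⟩
    by_cases hlt : a < i
    · have hit : i ∈ t := by
        rcases List.mem_cons.mp hi with h | h
        · omega
        · exact h
      simpa [hlt] using ih ht hit
    · have heq : a = i := by
        rcases List.mem_cons.mp hi with h | h
        · omega
        · exact absurd (ha i h) hlt
      simp [heq]

lemma dropWhile_lt_succ_of_notMem {l : List Nat} {i : Nat} (hi : i ∉ l) :
    l.dropWhile (fun j => decide (j < i)) = l.dropWhile (fun j => decide (j < i + 1)) := by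
  induction l with
  | nil => simp
  | cons a t ih =>
    rw [List.dropWhile_cons, List.dropWhile_cons]
    have hne : a ≠ i := fun h => hi (h ▸ List.mem_cons_self ..)
    by_cases hlt : a < i
    · have e1 : decide (a < i) = true := decide_eq_true hlt
      have e2 : decide (a < i + 1) = true := decide_eq_true (by omega)
      simp only [e1, e2, if_true]
      exact ih (fun h => hi (List.mem_cons_of_mem _ h))
    · have e1 : decide (a < i) = false := decide_eq_false hlt
      have e2 : decide (a < i + 1) = false := decide_eq_false (by omega)
      rw [e1, e2]
      rfl

lemma drop_dropWhile {l : List Int} (k : Nat) {c : Int}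
    (h : ∀ j ∈ l.take k, j < c) :
    (l.drop k).dropWhile (fun y => decide (y < c)) = l.dropWhile (fun y => decide (y < c)) := by
  conv_rhs => rw [← List.take_append_drop k l]
  rw [List.dropWhile_append_of_pos]
  intro a ha
  simpa using h a ha

-- characterisation of A's _find_sublist_index as "first occurrence ≥ start"
lemma pvFindLoop_char (main sub : List Int) (stop i : Nat) :
    pvFindLoop main sub i stop =
      match ((((List.range stop).filter (fun (j : Nat) => pvP main sub (j : Int))).dropWhile
              (fun j => decide (j < i)) : List Nat)).head? with
      | some j => (j : Int)
      | none => -1 := by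
  fun_induction pvFindLoop main sub i stop with
  | case1 i hlt hsl =>
    rw [dropWhile_lt_head_of_mem
      (List.Pairwise.sublist List.filter_sublist List.pairwise_lt_range)
      ((List.mem_filter (p := fun (j : Nat) => pvP main sub (j : Int))).mpr
        ⟨List.mem_range.mpr hlt, by simpa [pvP] using hsl⟩)]
  | case2 i hlt hsl ih =>
    rw [ih, ← dropWhile_lt_succ_of_notMem]
    intro hmem
    exact hsl (by simpa [pvP] using
      ((List.mem_filter (p := fun (j : Nat) => pvP main sub (j : Int))).mp hmem).2)
  | case3 i hlt =>
    rw [List.dropWhile_eq_nil_iff.mpr]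
    · simp
    · intro x hx
      have := List.mem_range.mp (List.mem_filter.mp hx).1
      simp; omega

lemma pvFind_char (main sub : List Int) (c : Int) (hm : sub ≠ []) (hc : 0 ≤ c) :
    pvFindSublistIndex main sub c =
      ((pvOcc main sub).dropWhile (fun y => decide (y < c))).headD (-1) := by
  have hmne : (sub.length : Int) ≠ 0 := by
    have : 0 < sub.length := List.length_pos_iff.mpr hm
    omega
  unfold pvFindSublistIndex
  simp only [if_neg hmne, if_neg (by omega : ¬ c < 0)]
  by_cases hbig : (sub.length : Int) > (main.length : Int) - c
  · rw [if_pos hbig]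
    have hnil : (pvOcc main sub).dropWhile (fun y => decide (y < c)) = [] := by
      apply List.dropWhile_eq_nil_iff.mpr
      intro x hx
      have := pvOcc_bounds main sub hx
      simp; omega
    rw [hnil]
    rfl
  · rw [if_neg hbig, pvFindLoop_char]
    rw [pvOcc_eq, List.dropWhile_map]
    have hpred : ((fun y => decide (y < c)) ∘ fun (j : Nat) => (j : Int))
        = fun (j : Nat) => decide (j < c.toNat) := by
      funext j
      simp only [Function.comp]
      rw [decide_eq_decide]
      omega
    rw [hpred]
    rcases hdw : ((List.range ((main.length : Int) - (sub.length : Int) + 1).toNat).filter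
        (fun (j : Nat) => pvP main sub (j : Int))).dropWhile
        (fun j => decide (j < c.toNat)) with _ | ⟨j, rest⟩ <;> simp

-- unfolding equations for pvPair
lemma pvPair_nil {starts ends : List Int} {m1 m2 pos : Int}
    (h : starts.dropWhile (fun s => decide (s < pos)) = []) :
    pvPair starts ends m1 m2 pos = [] := by
  conv_lhs => rw [pvPair.eq_def]
  split
  · rfl
  · rename_i s srest heq
    rw [h] at heq
    simp at heq

lemma pvPair_cons_nil {starts ends : List Int} {m1 m2 pos s : Int} {srest : List Int}
    (hS : starts.dropWhile (fun s => decide (s < pos)) = s :: srest)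
    (hE : ends.dropWhile (fun e => decide (e < s + m1)) = []) :
    pvPair starts ends m1 m2 pos = [] := by
  unfold pvPair
  split
  · rfl
  · rename_i s' srest' heq
    rw [hS] at heq
    injection heq with h1 h2
    subst h1; subst h2
    rw [hE]

lemma pvPair_cons {starts ends : List Int} {m1 m2 pos s e : Int} {srest erest : List Int}
    (hS : starts.dropWhile (fun s => decide (s < pos)) = s :: srest)
    (hE : ends.dropWhile (fun e => decide (e < s + m1)) = e :: erest) :
    pvPair starts ends m1 m2 pos
      = (s + m1, e + m2) :: pvPair srest (e :: erest) m1 m2 (e + m2) := by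
  conv_lhs => rw [pvPair.eq_def]
  split
  · rename_i heq
    rw [hS] at heq
    simp at heq
  · rename_i s' srest' heq
    rw [hS] at heq
    injection heq with h1 h2
    subst h1; subst h2
    rw [hE]

-- setting one index inside a replicate of `false`
lemma set_replicate_true : ∀ (r q : Nat), q < r →
    (List.replicate r false).set q true
      = List.replicate q false ++ true :: List.replicate (r - q - 1) false := by
  intro r
  induction r with
  | zero => intro q h; omega
  | succ r ih =>
    intro q h
    cases q with
    | zero => simp [List.replicate_succ]
    | succ q =>
      rw [List.replicate_succ, List.set_cons_succ, ih q (by omega)]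
      have : r + 1 - (q + 1) - 1 = r - q - 1 := by omega
      rw [this]
      simp [List.replicate_succ, List.cons_append]

-- the inner masking loop writes a run of `true` over a suffix of `false`s
lemma pvSetLoop_shape (d : Nat) : ∀ (pre : List Bool) (k lo hi n : Nat),
    hi - lo = d → pre.length = k → k ≤ lo → lo ≤ hi → hi ≤ n →
    pvSetLoop (pre ++ List.replicate (n - k) false) lo hi n
      = pre ++ List.replicate (lo - k) false ++ List.replicate (hi - lo) true
          ++ List.replicate (n - hi) false := by
  induction d with
  | zero =>
    intro pre k lo hi n hd hk hklo hlohi hhin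
    rw [pvSetLoop, if_neg (by omega : ¬ lo < hi)]
    have hsplit : n - k = (lo - k) + (n - hi) := by omega
    rw [hsplit, List.replicate_add, hd]
    simp [List.append_assoc]
  | succ d ih =>
    intro pre k lo hi n hd hk hklo hlohi hhin
    have hlt : lo < hi := by omega
    rw [pvSetLoop, if_pos hlt, if_pos (by omega : lo < n)]
    have hset : (pre ++ List.replicate (n - k) false).set lo true
        = (pre ++ List.replicate (lo - k) false ++ [true]) ++ List.replicate (n - (lo + 1)) false := by
      rw [List.set_append_right _ _ (by omega : pre.length ≤ lo)]
      rw [hk, set_replicate_true (n - k) (lo - k) (by omega)]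
      have h1 : n - k - (lo - k) - 1 = n - (lo + 1) := by omega
      rw [h1]
      simp [List.append_assoc, List.cons_append]
    rw [hset]
    have hrec := ih (pre ++ List.replicate (lo - k) false ++ [true]) (lo + 1) (lo + 1) hi n
      (by omega) (by simp [hk]; omega) (Nat.le_refl _) (by omega) hhin
    rw [hrec]
    have h2 : hi - lo = (hi - (lo + 1)) + 1 := by omega
    rw [h2, List.replicate_succ]
    simp [List.append_assoc, List.cons_append]

-- main loop invariant: A's while loop computes B's runs
lemma pvMain (tokens startT endT : List Int) (hm1 : startT ≠ []) (hm2 : endT ≠ []) :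
    ∀ (fuel : Nat) (c : Int) (kS kE : Nat) (pre : List Bool),
    0 ≤ c → c ≤ (tokens.length : Int) →
    (tokens.length : Int) - c < (fuel : Int) →
    pre.length = c.toNat →
    (∀ j ∈ (pvOcc tokens startT).take kS, j < c) →
    (∀ j ∈ (pvOcc tokens endT).take kE, j < c) →
    pvALoop tokens startT endT tokens.length fuel c
        (pre ++ List.replicate (tokens.length - c.toNat) false)
      = pre ++ pvBuild (pvPair ((pvOcc tokens startT).drop kS) ((pvOcc tokens endT).drop kE)
          (startT.length : Int) (endT.length : Int) c) c (tokens.length : Int) := by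
  intro fuel
  induction fuel with
  | zero =>
    intro c kS kE pre hc0 hcn hfuel hpre hkS hkE
    exfalso; omega
  | succ fuel ih =>
    intro c kS kE pre hc0 hcn hfuel hpre hkS hkE
    have hm1' : 1 ≤ (startT.length : Int) := by
      have := List.length_pos_iff.mpr hm1; omega
    have hm2' : 1 ≤ (endT.length : Int) := by
      have := List.length_pos_iff.mpr hm2; omega
    have hdS := drop_dropWhile (l := pvOcc tokens startT) kS (c := c) hkS
    have hcnt : ((tokens.length : Int) - c).toNat = tokens.length - c.toNat := by omega
    simp only [pvALoop]
    by_cases hcn' : c < (tokens.length : Int)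
    case neg =>
      rw [if_neg hcn']
      have hnil : (pvOcc tokens startT).dropWhile (fun y => decide (y < c)) = [] := by
        apply List.dropWhile_eq_nil_iff.mpr
        intro x hx
        obtain ⟨h1, h2⟩ := pvOcc_bounds tokens startT hx
        simp; omega
      rw [pvPair_nil (hdS.trans hnil)]
      simp only [pvBuild]
      rw [hcnt]
    case pos =>
      rw [if_pos hcn', pvFind_char tokens startT c hm1 hc0]
      rcases hS : (pvOcc tokens startT).dropWhile (fun y => decide (y < c)) with _ | ⟨s0, srest⟩
      · rw [List.headD_nil, if_pos rfl]
        rw [pvPair_nil (hdS.trans hS)]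
        simp only [pvBuild]
        rw [hcnt]
      · rw [List.headD_cons]
        have hs0mem : s0 ∈ pvOcc tokens startT := by
          have h1 : s0 ∈ (pvOcc tokens startT).dropWhile (fun y => decide (y < c)) := by
            rw [hS]; exact List.mem_cons_self ..
          exact (List.dropWhile_sublist _).subset h1
        obtain ⟨hs0nn, hs0ub⟩ := pvOcc_bounds tokens startT hs0mem
        have hs0ge : c ≤ s0 := by
          have := dropWhile_head_false _ hS
          simp at this; omega
        rw [if_neg (by omega : ¬ (s0 : Int) = -1)]
        rw [if_neg (by omega : ¬ s0 + (startT.length : Int) > (tokens.length : Int))]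
        rw [pvFind_char tokens endT _ hm2 (by omega)]
        have hdE := drop_dropWhile (l := pvOcc tokens endT) kE
          (c := s0 + (startT.length : Int)) (fun j hj => by have := hkE j hj; omega)
        rcases hE : (pvOcc tokens endT).dropWhile (fun y => decide (y < s0 + (startT.length : Int))) with _ | ⟨e0, erest⟩
        · rw [List.headD_nil, if_pos rfl]
          rw [pvPair_cons_nil (hdS.trans hS) (hdE.trans hE)]
          simp only [pvBuild]
          rw [hcnt]
        · rw [List.headD_cons]
          have he0mem : e0 ∈ pvOcc tokens endT := by
            have h1 : e0 ∈ (pvOcc tokens endT).dropWhile (fun y => decide (y < s0 + (startT.length : Int))) := by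
              rw [hE]; exact List.mem_cons_self ..
            exact (List.dropWhile_sublist _).subset h1
          obtain ⟨he0nn, he0ub⟩ := pvOcc_bounds tokens endT he0mem
          have he0ge : s0 + (startT.length : Int) ≤ e0 := by
            have := dropWhile_head_false _ hE
            simp at this; omega
          rw [if_neg (by omega : ¬ (e0 : Int) = -1)]
          have hshape := pvSetLoop_shape
            ((e0 + (endT.length : Int)).toNat - (s0 + (startT.length : Int)).toNat)
            pre c.toNat (s0 + (startT.length : Int)).toNat (e0 + (endT.length : Int)).toNat
            tokens.length rfl hpre (by omega) (by omega) (by omega)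
          rw [hshape]
          -- decompose the occurrence lists at the chosen start / end
          set tS := (pvOcc tokens startT).takeWhile (fun y => decide (y < c)) with htS
          set tE := (pvOcc tokens endT).takeWhile
            (fun y => decide (y < s0 + (startT.length : Int))) with htE
          have hoccS : pvOcc tokens startT = tS ++ s0 :: srest := by
            conv_lhs => rw [← List.takeWhile_append_dropWhile
              (p := fun y => decide (y < c)) (l := pvOcc tokens startT)]
            rw [hS, ← htS]
          have hoccE : pvOcc tokens endT = tE ++ e0 :: erest := by
            conv_lhs => rw [← List.takeWhile_append_dropWhile
              (p := fun y => decide (y < s0 + (startT.length : Int))) (l := pvOcc tokens endT)]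
            rw [hE, ← htE]
          have hdropS : (pvOcc tokens startT).drop (tS.length + 1) = srest := by
            rw [hoccS, List.drop_append]
            rw [List.drop_eq_nil_of_le (by omega : tS.length ≤ tS.length + 1)]
            have h1 : tS.length + 1 - tS.length = 1 := by omega
            rw [h1]
            rfl
          have htakeS : (pvOcc tokens startT).take (tS.length + 1) = tS ++ [s0] := by
            rw [hoccS, List.take_append]
            rw [List.take_of_length_le (by omega : tS.length ≤ tS.length + 1)]
            have h1 : tS.length + 1 - tS.length = 1 := by omega
            rw [h1]
            rfl
          have hdropE : (pvOcc tokens endT).drop tE.length = e0 :: erest := by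
            rw [hoccE, List.drop_append]
            rw [List.drop_eq_nil_of_le (by omega : tE.length ≤ tE.length), Nat.sub_self]
            rfl
          have htakeE : (pvOcc tokens endT).take tE.length = tE := by
            rw [hoccE, List.take_append]
            rw [List.take_of_length_le (by omega : tE.length ≤ tE.length), Nat.sub_self]
            simp
          have hkS' : ∀ j ∈ (pvOcc tokens startT).take (tS.length + 1),
              j < e0 + (endT.length : Int) := by
            rw [htakeS]
            intro j hj
            rcases List.mem_append.mp hj with hj | hj
            · have := List.mem_takeWhile_imp (htS ▸ hj)
              simp at this; omega
            · simp at hj; omega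
          have hkE' : ∀ j ∈ (pvOcc tokens endT).take tE.length,
              j < e0 + (endT.length : Int) := by
            rw [htakeE]
            intro j hj
            have := List.mem_takeWhile_imp (htE ▸ hj)
            simp at this; omega
          have lenpre : (pre
              ++ List.replicate ((s0 + (startT.length : Int)).toNat - c.toNat) false
              ++ List.replicate ((e0 + (endT.length : Int)).toNat - (s0 + (startT.length : Int)).toNat) true).length
              = (e0 + (endT.length : Int)).toNat := by
            simp [hpre]; omega
          have hIH := ih (e0 + (endT.length : Int)) (tS.length + 1) tE.length
            (pre ++ List.replicate ((s0 + (startT.length : Int)).toNat - c.toNat) false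
              ++ List.replicate ((e0 + (endT.length : Int)).toNat - (s0 + (startT.length : Int)).toNat) true)
            (by omega) (by omega) (by omega) lenpre hkS' hkE'
          rw [hdropS, hdropE] at hIH
          rw [hIH]
          rw [pvPair_cons (hdS.trans hS) (hdE.trans hE)]
          simp only [pvBuild]
          have c1 : ((s0 + (startT.length : Int)) - c).toNat
              = (s0 + (startT.length : Int)).toNat - c.toNat := by omega
          have c2 : ((e0 + (endT.length : Int)) - (s0 + (startT.length : Int))).toNat
              = (e0 + (endT.length : Int)).toNat - (s0 + (startT.length : Int)).toNat := by omega
          rw [c1, c2]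
          simp [List.append_assoc]

-- ===== VERDICT (by name: the statement is the Claim_ definition above) =====
theorem get_answer_mask_spec : Claim_equal_get_answer_mask := by
  intro tokens startT endT _
  unfold Spec_get_answer_mask get_answer_mask get_answer_mask_alt
  by_cases h : startT = [] ∨ endT = []
  · simp [h]
  · rw [if_neg h, if_neg h]
    have h1 : startT ≠ [] := fun hh => h (Or.inl hh)
    have h2 : endT ≠ [] := fun hh => h (Or.inr hh)
    have := pvMain tokens startT endT h1 h2 (tokens.length + 1) 0 0 0 []
      (by omega) (by exact_mod_cast Int.natCast_nonneg tokens.length) (by push_cast; omega)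
      (by simp) (by simp) (by simp)
    simpa using this
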